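-- pv_equiv track=rewrite | github.com/am7249/Algorithmic-Sprint | Element of Programming Interview in Python/Strings/Strings.py | sinusoidally
-- ===== SOURCE A (Python) =====
-- def sinusoidally(s):
--     result = []
--     for i in range(1,len(s),4):
--         result.append(s[i])
--     for j in range(0,len(s),2):
--         result.append(s[j])
--     for k in range(3,len(s),4):
--         result.append(s[k])
--
--     return "".join(result)
-- ===== SOURCE B (Python) =====
-- def sinusoidally(s):
--     group1, group2, group3 = [], [], []
--     for i, c in enumerate(s):
--         if i % 2 == 0:
--             group2.append(c)
--         elif i % 4 == 1:
--             group1.append(c)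
--         else:
--             group3.append(c)
--     return "".join(group1 + group2 + group3)
-- ===== Notes on version B (the rewrite author's own statement) =====
-- stated objective: alternative
-- what changed: Replaces A's three separate index-range scans over the string by a single pass over enumerate(s) that routes each character into one of three buckets by its index modulo 2/4, then concatenates the buckets.
import Mathlib
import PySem

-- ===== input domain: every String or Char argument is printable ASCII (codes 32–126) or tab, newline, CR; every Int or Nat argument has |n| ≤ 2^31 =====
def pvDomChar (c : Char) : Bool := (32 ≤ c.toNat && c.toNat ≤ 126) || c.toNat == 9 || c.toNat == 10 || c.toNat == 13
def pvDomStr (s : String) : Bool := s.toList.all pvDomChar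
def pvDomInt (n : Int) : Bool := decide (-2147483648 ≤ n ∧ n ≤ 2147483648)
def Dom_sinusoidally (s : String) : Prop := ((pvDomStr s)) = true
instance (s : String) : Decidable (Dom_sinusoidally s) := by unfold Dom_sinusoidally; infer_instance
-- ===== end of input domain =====

-- B replaces A's three sequential index-range scans by one pass over enumerate(s)
-- routing each character into one of three buckets by index mod 2/4 (alternative decomposition, same cost).

-- ===== PORT A =====
-- The loop indices are always in bounds, so the pyGetD default ' ' is never used (exact for Python s[i]).
def sinusoidally (s : String) : String :=
  let cs := s.toList
  let result1 : List Char :=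
    (PySem.List.pyRange 1 (PySem.Str.len s) 4).foldl (fun r i => r ++ [PySem.List.pyGetD cs i ' ']) []
  let result2 : List Char :=
    (PySem.List.pyRange 0 (PySem.Str.len s) 2).foldl (fun r j => r ++ [PySem.List.pyGetD cs j ' ']) result1
  let result3 : List Char :=
    (PySem.List.pyRange 3 (PySem.Str.len s) 4).foldl (fun r k => r ++ [PySem.List.pyGetD cs k ' ']) result2
  String.mk result3

-- ===== PORT B =====
def sinusoidally_alt (s : String) : String :=
  let t : List Char × List Char × List Char :=
    (PySem.List.enumerate s.toList).foldl
      (fun g p =>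
        if PySem.Int.mod p.1 2 = 0 then (g.1, g.2.1 ++ [p.2], g.2.2)
        else if PySem.Int.mod p.1 4 = 1 then (g.1 ++ [p.2], g.2.1, g.2.2)
        else (g.1, g.2.1, g.2.2 ++ [p.2]))
      ([], [], [])
  String.mk (t.1 ++ t.2.1 ++ t.2.2)

-- ===== PRECONDITION & SPEC =====
def Spec_sinusoidally (s : String) (out : String) : Prop := out = sinusoidally_alt s
instance (s : String) (out : String) : Decidable (Spec_sinusoidally s out) := by unfold Spec_sinusoidally; infer_instance

-- ===== CLAIM (what is proved, stated in full; the proofs are below) =====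
def Claim_equal_sinusoidally : Prop := ∀ (s : String), Dom_sinusoidally s → Spec_sinusoidally s (sinusoidally s)

-- ===== LEMMAS AND PROOFS =====

-- A-side loop shape: appending one element per index is mapping over the range.
theorem foldl_snoc {α β : Type} (f : α → β) : ∀ (l : List α) (acc : List β),
    l.foldl (fun r i => r ++ [f i]) acc = acc ++ l.map f := by
  intro l
  induction l with
  | nil => simp
  | cons x xs ih => intro acc; simp [List.foldl_cons, ih]

-- The three buckets B collects, as filters of the enumerated list.
def sel1 (l : List (Int × Char)) : List Char :=
  (l.filter (fun p => !(decide (PySem.Int.mod p.1 2 = 0)) && decide (PySem.Int.mod p.1 4 = 1))).map Prod.snd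
def sel2 (l : List (Int × Char)) : List Char :=
  (l.filter (fun p => decide (PySem.Int.mod p.1 2 = 0))).map Prod.snd
def sel3 (l : List (Int × Char)) : List Char :=
  (l.filter (fun p => !(decide (PySem.Int.mod p.1 2 = 0)) && !(decide (PySem.Int.mod p.1 4 = 1)))).map Prod.snd

theorem bfold : ∀ (l : List (Int × Char)) (g1 g2 g3 : List Char),
    l.foldl
      (fun g p =>
        if PySem.Int.mod p.1 2 = 0 then (g.1, g.2.1 ++ [p.2], g.2.2)
        else if PySem.Int.mod p.1 4 = 1 then (g.1 ++ [p.2], g.2.1, g.2.2)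
        else (g.1, g.2.1, g.2.2 ++ [p.2]))
      (g1, g2, g3)
    = (g1 ++ sel1 l, g2 ++ sel2 l, g3 ++ sel3 l) := by
  intro l
  induction l with
  | nil => intro g1 g2 g3; simp [sel1, sel2, sel3]
  | cons p ps ih =>
    intro g1 g2 g3
    by_cases h2 : PySem.Int.mod p.1 2 = 0
    · rw [List.foldl_cons, if_pos h2, ih]
      simp only [sel1, sel2, sel3, List.filter_cons, h2, decide_true, Bool.not_true,
        Bool.false_and, Bool.false_eq_true, if_false, if_true, List.map_cons,
        List.append_assoc, List.cons_append, List.nil_append]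
    · by_cases h4 : PySem.Int.mod p.1 4 = 1
      · rw [List.foldl_cons, if_neg h2, if_pos h4, ih]
        simp only [sel1, sel2, sel3, List.filter_cons, h4, decide_true, h2, decide_false, Bool.not_false, Bool.true_and,
          Bool.not_true, Bool.and_false, Bool.false_eq_true, if_false, if_true,
          List.map_cons, List.append_assoc, List.cons_append, List.nil_append]
      · rw [List.foldl_cons, if_neg h2, if_neg h4, ih]
        simp only [sel1, sel2, sel3, List.filter_cons, h4, h2, decide_false,
          Bool.not_false, Bool.true_and, Bool.and_false, Bool.false_eq_true,
          if_false, if_true, List.map_cons, List.append_assoc, List.cons_append,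
          List.nil_append]

theorem enumerate_shift {α : Type} : ∀ (xs : List α) (s c : Int),
    PySem.List.enumerate xs (s + c) = (PySem.List.enumerate xs s).map (fun p => (p.1 + c, p.2)) := by
  intro xs
  induction xs with
  | nil => intro s c; simp [PySem.List.enumerate_nil]
  | cons x t ih =>
    intro s c
    rw [PySem.List.enumerate_cons, PySem.List.enumerate_cons]
    have : s + c + 1 = (s + 1) + c := by ring
    simp [this, ih]

theorem mod_add_four2 (i : Int) : PySem.Int.mod (i + 4) 2 = PySem.Int.mod i 2 := by
  rw [PySem.Int.mod_eq_emod_of_pos (by norm_num), PySem.Int.mod_eq_emod_of_pos (by norm_num)]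
  omega

theorem mod_add_four4 (i : Int) : PySem.Int.mod (i + 4) 4 = PySem.Int.mod i 4 := by
  rw [PySem.Int.mod_eq_emod_of_pos (by norm_num), PySem.Int.mod_eq_emod_of_pos (by norm_num)]
  omega

theorem sel1_shift (l : List (Int × Char)) :
    sel1 (l.map (fun p => (p.1 + 4, p.2))) = sel1 l := by
  unfold sel1
  rw [List.filter_map, List.map_map]
  have hc : ((fun p : Int × Char => !(decide (PySem.Int.mod p.1 2 = 0)) && decide (PySem.Int.mod p.1 4 = 1)) ∘ fun p : Int × Char => (p.1 + 4, p.2))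
      = (fun p : Int × Char => !(decide (PySem.Int.mod p.1 2 = 0)) && decide (PySem.Int.mod p.1 4 = 1)) := by
    funext p
    simp only [Function.comp_apply]
    rw [mod_add_four2 p.1, mod_add_four4 p.1]
  rw [hc]
  exact List.map_congr_left (fun p _ => rfl)

theorem sel2_shift (l : List (Int × Char)) :
    sel2 (l.map (fun p => (p.1 + 4, p.2))) = sel2 l := by
  unfold sel2
  rw [List.filter_map, List.map_map]
  have hc : ((fun p : Int × Char => decide (PySem.Int.mod p.1 2 = 0)) ∘ fun p : Int × Char => (p.1 + 4, p.2))
      = (fun p : Int × Char => decide (PySem.Int.mod p.1 2 = 0)) := by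
    funext p
    simp only [Function.comp_apply]
    rw [mod_add_four2 p.1]
  rw [hc]
  exact List.map_congr_left (fun p _ => rfl)

theorem sel3_shift (l : List (Int × Char)) :
    sel3 (l.map (fun p => (p.1 + 4, p.2))) = sel3 l := by
  unfold sel3
  rw [List.filter_map, List.map_map]
  have hc : ((fun p : Int × Char => !(decide (PySem.Int.mod p.1 2 = 0)) && !(decide (PySem.Int.mod p.1 4 = 1))) ∘ fun p : Int × Char => (p.1 + 4, p.2))
      = (fun p : Int × Char => !(decide (PySem.Int.mod p.1 2 = 0)) && !(decide (PySem.Int.mod p.1 4 = 1))) := by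
    funext p
    simp only [Function.comp_apply]
    rw [mod_add_four2 p.1, mod_add_four4 p.1]
  rw [hc]
  exact List.map_congr_left (fun p _ => rfl)

theorem pr_shift (a b c s : Int) (hs : 0 < s) :
    PySem.List.pyRange (a + c) (b + c) s = (PySem.List.pyRange a b s).map (· + c) := by
  rw [PySem.List.pyRange_of_pos _ _ hs, PySem.List.pyRange_of_pos _ _ hs, List.map_map]
  have h1 : b + c - (a + c) + s - 1 = b - a + s - 1 := by ring
  have h2 : (a + c < b + c) ↔ (a < b) := by omega
  rw [h1]
  simp only [h2]
  apply List.map_congr_left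
  intro k _
  simp only [Function.comp_apply]
  ring

theorem pr_cons4 (a b : Int) (h : a < b) :
    PySem.List.pyRange a b 4 = a :: PySem.List.pyRange (a + 4) b 4 := by
  rw [PySem.List.pyRange_of_pos _ _ (by norm_num : (0:Int) < 4),
      PySem.List.pyRange_of_pos _ _ (by norm_num : (0:Int) < 4)]
  rw [if_pos h]
  have hN : (b - a + 4 - 1) / 4 = ((if a + 4 < b then ((b - (a + 4) + 4 - 1) / 4).toNat else 0) : Nat) + 1 := by
    split_ifs with h2 <;> omega
  have hN' : ((b - a + 4 - 1) / 4).toNat = ((if a + 4 < b then ((b - (a + 4) + 4 - 1) / 4).toNat else 0) : Nat) + 1 := by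
    omega
  rw [hN', List.range_succ_eq_map]
  simp [List.map_map, Function.comp]
  intro k _
  ring

theorem pr_cons2 (a b : Int) (h : a < b) :
    PySem.List.pyRange a b 2 = a :: PySem.List.pyRange (a + 2) b 2 := by
  rw [PySem.List.pyRange_of_pos _ _ (by norm_num : (0:Int) < 2),
      PySem.List.pyRange_of_pos _ _ (by norm_num : (0:Int) < 2)]
  rw [if_pos h]
  have hN' : ((b - a + 2 - 1) / 2).toNat = ((if a + 2 < b then ((b - (a + 2) + 2 - 1) / 2).toNat else 0) : Nat) + 1 := by
    split_ifs with h2 <;> omega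
  rw [hN', List.range_succ_eq_map]
  simp [List.map_map, Function.comp]
  intro k _
  ring

theorem pyGetD_cons4 (a b c d : Char) (tl : List Char) (i : Int) (hi : 0 ≤ i) :
    PySem.List.pyGetD (a :: b :: c :: d :: tl) (i + 4) ' ' = PySem.List.pyGetD tl i ' ' := by
  rw [PySem.List.pyGetD_of_nonneg _ _ (by omega), PySem.List.pyGetD_of_nonneg _ _ hi]
  have : (i + 4).toNat = i.toNat + 4 := by omega
  rw [this]
  rfl

theorem sel1_heads (a b c d : Char) (l : List (Int × Char)) :
    sel1 ((0, a) :: (1, b) :: (2, c) :: (3, d) :: l.map (fun p => (p.1 + 4, p.2))) = b :: sel1 l := by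
  rw [← sel1_shift l]
  simp [sel1, PySem.Int.mod, Int.fmod]

theorem sel2_heads (a b c d : Char) (l : List (Int × Char)) :
    sel2 ((0, a) :: (1, b) :: (2, c) :: (3, d) :: l.map (fun p => (p.1 + 4, p.2))) = a :: c :: sel2 l := by
  rw [← sel2_shift l]
  simp [sel2, PySem.Int.mod, Int.fmod]

theorem sel3_heads (a b c d : Char) (l : List (Int × Char)) :
    sel3 ((0, a) :: (1, b) :: (2, c) :: (3, d) :: l.map (fun p => (p.1 + 4, p.2))) = d :: sel3 l := by
  rw [← sel3_shift l]
  simp [sel3, PySem.Int.mod, Int.fmod]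

-- main characterisation: A's three range-maps are exactly B's three buckets
def Pmain (cs : List Char) : Prop :=
  (PySem.List.pyRange 1 (cs.length : Int) 4).map (fun i => PySem.List.pyGetD cs i ' ')
      = sel1 (PySem.List.enumerate cs 0)
  ∧ (PySem.List.pyRange 0 (cs.length : Int) 2).map (fun i => PySem.List.pyGetD cs i ' ')
      = sel2 (PySem.List.enumerate cs 0)
  ∧ (PySem.List.pyRange 3 (cs.length : Int) 4).map (fun i => PySem.List.pyGetD cs i ' ')
      = sel3 (PySem.List.enumerate cs 0)

theorem pmain : ∀ (n : Nat) (cs : List Char), cs.length = n → Pmain cs := by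
  intro n
  induction n using Nat.strong_induction_on with
  | _ n ih =>
    intro cs hlen
    match cs with
    | [] =>
      refine ⟨?_, ?_, ?_⟩ <;>
        norm_num [sel1, sel2, sel3, PySem.List.enumerate_nil,
          PySem.List.pyRange_of_pos _ _ (show (0:Int) < 4 by norm_num),
          PySem.List.pyRange_of_pos _ _ (show (0:Int) < 2 by norm_num)]
    | [a] =>
      refine ⟨?_, ?_, ?_⟩ <;>
        norm_num [sel1, sel2, sel3, PySem.List.enumerate_cons, PySem.List.enumerate_nil,
          PySem.List.pyRange_of_pos _ _ (show (0:Int) < 4 by norm_num),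
          PySem.List.pyRange_of_pos _ _ (show (0:Int) < 2 by norm_num),
          PySem.Int.mod, Int.fmod, PySem.List.pyGetD]
    | [a, b] =>
      refine ⟨?_, ?_, ?_⟩ <;>
        norm_num [sel1, sel2, sel3, PySem.List.enumerate_cons, PySem.List.enumerate_nil,
          PySem.List.pyRange_of_pos _ _ (show (0:Int) < 4 by norm_num),
          PySem.List.pyRange_of_pos _ _ (show (0:Int) < 2 by norm_num),
          PySem.Int.mod, Int.fmod, PySem.List.pyGetD]
    | [a, b, c] =>
      refine ⟨?_, ?_, ?_⟩ <;>
        norm_num [sel1, sel2, sel3, PySem.List.enumerate_cons, PySem.List.enumerate_nil,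
          PySem.List.pyRange_of_pos _ _ (show (0:Int) < 4 by norm_num),
          PySem.List.pyRange_of_pos _ _ (show (0:Int) < 2 by norm_num),
          PySem.Int.mod, Int.fmod, PySem.List.pyGetD, PySem.List.pyGet?, PySem.List.pyIdx?,
          show Int.toNat 2 = 2 from rfl, List.range_succ]
    | a :: b :: c :: d :: tl =>
      have hm : tl.length < n := by simp at hlen; omega
      obtain ⟨ih1, ih2, ih3⟩ := ih tl.length hm tl rfl
      have hlen4 : ((a :: b :: c :: d :: tl).length : Int) = (tl.length : Int) + 4 := by
        simp; ring
      have henum : PySem.List.enumerate (a :: b :: c :: d :: tl) 0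
          = (0, a) :: (1, b) :: (2, c) :: (3, d) ::
            (PySem.List.enumerate tl 0).map (fun p => (p.1 + 4, p.2)) := by
        rw [PySem.List.enumerate_cons, PySem.List.enumerate_cons,
            PySem.List.enumerate_cons, PySem.List.enumerate_cons]
        norm_num
        have : (4 : Int) = 0 + 4 := by norm_num
        rw [this, enumerate_shift]
        norm_num
      -- shift the tail of each range-map down to tl
      have hmap : ∀ r : Int, 0 ≤ r →
          ((PySem.List.pyRange r (tl.length : Int) 4).map (· + 4)).map
              (fun i => PySem.List.pyGetD (a :: b :: c :: d :: tl) i ' ')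
            = (PySem.List.pyRange r (tl.length : Int) 4).map (fun i => PySem.List.pyGetD tl i ' ') := by
        intro r hr
        rw [List.map_map]
        apply List.map_congr_left
        intro i hi
        have := (PySem.List.mem_pyRange_iff_of_pos (by norm_num : (0:Int) < 4) i).mp hi
        simp only [Function.comp]
        exact pyGetD_cons4 a b c d tl i (by omega)
      have hmap2 : ∀ r : Int, 0 ≤ r →
          ((PySem.List.pyRange r (tl.length : Int) 2).map (· + 4)).map
              (fun i => PySem.List.pyGetD (a :: b :: c :: d :: tl) i ' ')
            = (PySem.List.pyRange r (tl.length : Int) 2).map (fun i => PySem.List.pyGetD tl i ' ') := by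
        intro r hr
        rw [List.map_map]
        apply List.map_congr_left
        intro i hi
        have := (PySem.List.mem_pyRange_iff_of_pos (by norm_num : (0:Int) < 2) i).mp hi
        simp only [Function.comp]
        exact pyGetD_cons4 a b c d tl i (by omega)
      refine ⟨?_, ?_, ?_⟩
      · -- group 1 : indices ≡ 1 (mod 4)
        rw [hlen4, pr_cons4 1 _ (by omega),
            (by norm_num : (1:Int) + 4 = 1 + 4), pr_shift 1 (tl.length : Int) 4 4 (by norm_num)]
        rw [henum]
        simp only [List.map_cons]
        rw [hmap 1 (by norm_num), ih1, sel1_heads,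
            PySem.List.pyGetD_of_nonneg _ _ (by norm_num : (0:Int) ≤ 1)]
        rfl
      · -- group 2 : even indices
        rw [hlen4, pr_cons2 0 _ (by omega), (by norm_num : (0:Int) + 2 = 2),
            pr_cons2 2 _ (by omega), (by norm_num : (2:Int) + 2 = 0 + 4),
            pr_shift 0 (tl.length : Int) 4 2 (by norm_num)]
        rw [henum]
        simp only [List.map_cons]
        rw [hmap2 0 (by norm_num), ih2, sel2_heads,
            PySem.List.pyGetD_of_nonneg _ _ (by norm_num : (0:Int) ≤ 0),
            PySem.List.pyGetD_of_nonneg _ _ (by norm_num : (0:Int) ≤ 2)]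
        rfl
      · -- group 3 : indices ≡ 3 (mod 4)
        rw [hlen4, pr_cons4 3 _ (by omega),
            (by norm_num : (3:Int) + 4 = 3 + 4), pr_shift 3 (tl.length : Int) 4 4 (by norm_num)]
        rw [henum]
        simp only [List.map_cons]
        rw [hmap 3 (by norm_num), ih3, sel3_heads,
            PySem.List.pyGetD_of_nonneg _ _ (by norm_num : (0:Int) ≤ 3)]
        rfl

-- ===== VERDICT (by name: the statement is the Claim_ definition above) =====
theorem sinusoidally_spec : Claim_equal_sinusoidally := by
  intro s _
  unfold Spec_sinusoidally sinusoidally sinusoidally_alt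
  obtain ⟨h1, h2, h3⟩ := pmain s.toList.length s.toList rfl
  simp only [foldl_snoc, bfold, PySem.Str.len_eq, List.nil_append]
  rw [h1, h2, h3]
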